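-- pv_equiv track=rewrite | github.com/kalyan-ch/SltnsCrkdCpp | CdFtsIntQ/stringClassify.py | classifyStrings
-- ===== SOURCE A (Python) =====
-- def vowCheck(s,ind):
--
--     #xx?
--
--     #?xx
--     #x?x
--     pass
--
-- def consCheck(s,ind):
--
--     pass
--
-- def classifyStrings(s):
--
--     vow = ["a","e","i","o","u"]
--     cons = ["b","c","d","f","g","h","j","k","l","m","n","p","q","r","s","t","v","w","x","y","z"]
--
--     v_cnt = 0
--     c_cnt = 0
--     res = "good"
--     lis = []
--     for i in range(len(s)):
--
--             if s[i] in vow: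
--                 v_cnt += 1
--                 c_cnt = 0
--             else:
--                 if s[i] in cons:
--                     c_cnt += 1
--                     v_cnt = 0
--
--             if v_cnt == 3:
--                 lis.append(0)
--             if c_cnt == 5:
--                 lis.append(1)
--
--
--     ind = s.find("?")
--
--     vowCheck(s,ind)
--     consCheck(s,ind)
--
--     if lis:
--         res = "bad"
--
--     return res
-- ===== SOURCE B (Python) =====
-- def classifyStrings(s):
--     vowels = "aeiou"
--     consonants = "bcdfghjklmnpqrstvwxyz"
--     reduced = "".join(
--         'v' if ch in vowels else 'c'
--         for ch in s if ch in vowels or ch in consonants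
--     )
--     return "bad" if "vvv" in reduced or "ccccc" in reduced else "good"
-- ===== Notes on version B (the rewrite author's own statement) =====
-- stated objective: simpler
-- what changed: Replaces A's running vowel/consonant counters, marker list and dead helper calls with a single normalize pass (keep only lowercase letters, mapped to vowel/consonant tags) followed by a plain substring search for a 3-vowel or 5-consonant run.
import Mathlib
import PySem

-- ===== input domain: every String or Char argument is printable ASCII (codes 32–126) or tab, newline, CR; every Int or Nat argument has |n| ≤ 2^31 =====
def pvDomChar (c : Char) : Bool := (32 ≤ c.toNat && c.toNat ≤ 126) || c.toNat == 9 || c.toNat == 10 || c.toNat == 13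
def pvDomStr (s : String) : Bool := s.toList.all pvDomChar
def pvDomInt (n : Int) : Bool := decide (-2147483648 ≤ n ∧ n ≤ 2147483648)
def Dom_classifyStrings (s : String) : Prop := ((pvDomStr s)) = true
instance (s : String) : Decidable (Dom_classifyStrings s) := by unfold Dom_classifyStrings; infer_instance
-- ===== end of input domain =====

-- B replaces A's running counters and marker list by a normalize-then-substring-search pass (simpler).
-- A's vowCheck/consCheck helpers are no-ops (pass) and its s.find("?") result is unused; ported as such.

-- ===== PORT A =====
def pvVowA : List Char := ['a','e','i','o','u']
def pvConsA : List Char :=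
  ['b','c','d','f','g','h','j','k','l','m','n','p','q','r','s','t','v','w','x','y','z']

-- one loop iteration: update the two counters, then the two '== 3' / '== 5' checks append markers
def pvStepA (st : Int × Int × List Int) (ch : Char) : Int × Int × List Int :=
  let vc := if ch ∈ pvVowA then (st.1 + 1, (0 : Int))
            else if ch ∈ pvConsA then ((0 : Int), st.2.1 + 1)
            else (st.1, st.2.1)
  let lis1 := if vc.1 = 3 then st.2.2 ++ [(0 : Int)] else st.2.2
  let lis2 := if vc.2 = 5 then lis1 ++ [(1 : Int)] else lis1
  (vc.1, vc.2, lis2)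

def classifyStrings (s : String) : String :=
  let st := s.toList.foldl pvStepA (0, 0, [])
  let _ind := PySem.Str.find s "?"   -- ind = s.find("?"); vowCheck(s,ind)/consCheck(s,ind) do nothing
  if st.2.2 = [] then "good" else "bad"

-- ===== PORT B =====
def pvVowB : List Char := ['a','e','i','o','u']
def pvConsB : List Char :=
  ['b','c','d','f','g','h','j','k','l','m','n','p','q','r','s','t','v','w','x','y','z']

-- the generator inside "".join: keep lowercase letters only, mapped to 'v'/'c'
def pvRed (ch : Char) : Option Char :=
  if ch ∈ pvVowB ∨ ch ∈ pvConsB then some (if ch ∈ pvVowB then 'v' else 'c') else none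

def classifyStrings_alt (s : String) : String :=
  let reduced := s.toList.filterMap pvRed
  if PySem.Chars.isIn ['v','v','v'] reduced || PySem.Chars.isIn ['c','c','c','c','c'] reduced
  then "bad" else "good"

-- ===== PRECONDITION & SPEC =====
def Spec_classifyStrings (s : String) (out : String) : Prop := out = classifyStrings_alt s
instance (s : String) (out : String) : Decidable (Spec_classifyStrings s out) := by unfold Spec_classifyStrings; infer_instance

-- ===== CLAIM (what is proved, stated in full; the proofs are below) =====
def Claim_equal_classifyStrings : Prop := ∀ (s : String), Dom_classifyStrings s → Spec_classifyStrings s (classifyStrings s)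

-- ===== LEMMAS AND PROOFS =====

-- length of the leading run of x
def pvLead (x : Char) : List Char → Nat
  | [] => 0
  | a :: t => if a = x then pvLead x t + 1 else 0

-- length of the trailing run of x
def pvTrail (x : Char) (r : List Char) : Nat := pvLead x r.reverse

-- "the reduced string contains vvv or ccccc"
def pvBad (r : List Char) : Prop :=
  ['v','v','v'] <:+: r ∨ ['c','c','c','c','c'] <:+: r

lemma pvInfix_concat {t r : List Char} {x : Char} :
    t <:+: r ++ [x] ↔ t <:+: r ∨ t <:+ r ++ [x] := by
  constructor
  · rintro ⟨a, b, h⟩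
    rcases List.eq_nil_or_concat b with hb | ⟨b', y, hb⟩
    · subst hb; right; exact ⟨a, by simpa using h⟩
    · subst hb
      left
      have h' : (a ++ t ++ b') ++ [y] = r ++ [x] := by simpa using h
      have := List.append_inj_left' h' rfl
      exact ⟨a, b', this⟩
  · rintro (h | h)
    · obtain ⟨a, b, hh⟩ := h
      exact ⟨a, b ++ [x], by rw [← hh]; simp⟩
    · exact h.isInfix

lemma pvReplicate_prefix {x : Char} : ∀ (n : Nat) (m : List Char),
    List.replicate n x <+: m ↔ n ≤ pvLead x m := by
  intro n
  induction n with
  | zero => intro m; simp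
  | succ k ih =>
    intro m
    cases m with
    | nil => simp [pvLead, List.replicate_succ]
    | cons a t =>
      by_cases ha : a = x
      · subst ha
        simp [List.replicate_succ, pvLead, ih t]
      · simp [List.replicate_succ, pvLead, ha, Ne.symm ha]

lemma pvSuffix_iff_trail {x : Char} {n : Nat} {r : List Char} :
    List.replicate n x <:+ r ↔ n ≤ pvTrail x r := by
  rw [← List.reverse_prefix, List.reverse_replicate]
  exact pvReplicate_prefix n r.reverse

lemma pvTrail_concat_self (x : Char) (r : List Char) :
    pvTrail x (r ++ [x]) = pvTrail x r + 1 := by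
  simp [pvTrail, pvLead]

lemma pvTrail_concat_ne (x y : Char) (r : List Char) (h : y ≠ x) :
    pvTrail x (r ++ [y]) = 0 := by
  simp [pvTrail, pvLead, h]

lemma pvBad_v_bound {r : List Char} (h : ¬ pvBad r) : pvTrail 'v' r ≤ 2 := by
  by_contra hlt
  exact h (Or.inl (((pvSuffix_iff_trail (n := 3)).2 (by omega)).isInfix))

lemma pvBad_c_bound {r : List Char} (h : ¬ pvBad r) : pvTrail 'c' r ≤ 4 := by
  by_contra hlt
  exact h (Or.inr (((pvSuffix_iff_trail (n := 5)).2 (by omega)).isInfix))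

lemma pvBad_concat (r : List Char) (x : Char) :
    pvBad (r ++ [x]) ↔ pvBad r ∨ 3 ≤ pvTrail 'v' (r ++ [x]) ∨ 5 ≤ pvTrail 'c' (r ++ [x]) := by
  unfold pvBad
  rw [pvInfix_concat, pvInfix_concat]
  have hv : (['v','v','v'] <:+ r ++ [x]) ↔ 3 ≤ pvTrail 'v' (r ++ [x]) := by
    simpa using pvSuffix_iff_trail (x := 'v') (n := 3) (r := r ++ [x])
  have hc : (['c','c','c','c','c'] <:+ r ++ [x]) ↔ 5 ≤ pvTrail 'c' (r ++ [x]) := by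
    simpa using pvSuffix_iff_trail (x := 'c') (n := 5) (r := r ++ [x])
  rw [hv, hc]; tauto

-- main loop invariant, by induction from the right end of the string
lemma pvInv : ∀ (l : List Char),
    (l.foldl pvStepA (0, 0, [])).1 = (pvTrail 'v' (l.filterMap pvRed) : Int) ∧
    (l.foldl pvStepA (0, 0, [])).2.1 = (pvTrail 'c' (l.filterMap pvRed) : Int) ∧
    ((l.foldl pvStepA (0, 0, [])).2.2 = [] ↔ ¬ pvBad (l.filterMap pvRed)) := by
  intro l
  induction l using List.reverseRecOn with
  | nil =>
    refine ⟨rfl, rfl, ?_⟩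
    simp [pvBad]
  | append_singleton l ch ih =>
    obtain ⟨ihv, ihc, ihl⟩ := ih
    rw [List.foldl_append, List.filterMap_append] at *
    set st := l.foldl pvStepA (0, 0, []) with hst
    set r := l.filterMap pvRed with hr
    by_cases hv : ch ∈ pvVowA
    · -- vowel: reduced gains 'v'
      have hred : List.filterMap pvRed [ch] = ['v'] := by
        have h1 : ch ∈ pvVowB := hv
        simp [pvRed, h1]
      rw [hred]
      have htv := pvTrail_concat_self 'v' r
      have htc := pvTrail_concat_ne 'c' 'v' r (by decide)
      refine ⟨?_, ?_, ?_⟩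
      · simp [pvStepA, hv, ihv, htv]
      · simp [pvStepA, hv, htc]
      · simp only [List.foldl_cons, List.foldl_nil, pvStepA, if_pos hv]
        rw [pvBad_concat, htv, htc,
            if_neg (by norm_num : ¬ ((0 : Int) = 5))]
        constructor
        · intro h
          split_ifs at h with h1
          · simp at h
          have hb := ihl.1 h
          have hle := pvBad_v_bound hb
          rintro (hB | h3 | h5)
          · exact hb hB
          · exact h1 (by rw [ihv]; omega)
          · omega
        · intro h
          have hb : ¬ pvBad r := fun x => h (Or.inl x)
          have h3 : ¬ (3 ≤ pvTrail 'v' r + 1) := fun x => h (Or.inr (Or.inl x))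
          have h1 : ¬ (st.1 + 1 = 3) := by rw [ihv]; omega
          simp [h1, ihl.2 hb]

    · by_cases hc : ch ∈ pvConsA
      · -- consonant: reduced gains 'c'
        have hred : List.filterMap pvRed [ch] = ['c'] := by
          have h1 : ch ∉ pvVowB := hv
          have h2 : ch ∈ pvConsB := hc
          simp [pvRed, h1, h2]
        rw [hred]
        have htv := pvTrail_concat_ne 'v' 'c' r (by decide)
        have htc := pvTrail_concat_self 'c' r
        refine ⟨?_, ?_, ?_⟩
        · simp [pvStepA, hv, hc, htv]
        · simp [pvStepA, hv, hc, ihc, htc]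
        · simp only [List.foldl_cons, List.foldl_nil, pvStepA, if_neg hv, if_pos hc]
          rw [pvBad_concat, htv, htc,
              if_neg (by norm_num : ¬ ((0 : Int) = 3))]
          constructor
          · intro h
            split_ifs at h with h2
            · simp at h
            have hb := ihl.1 h
            have hle := pvBad_c_bound hb
            rintro (hB | h3 | h5)
            · exact hb hB
            · omega
            · exact h2 (by rw [ihc]; omega)
          · intro h
            have hb : ¬ pvBad r := fun x => h (Or.inl x)
            have h5 : ¬ (5 ≤ pvTrail 'c' r + 1) := fun x => h (Or.inr (Or.inr x))
            have h2 : ¬ (st.2.1 + 1 = 5) := by rw [ihc]; omega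
            simp [h2, ihl.2 hb]
      · -- neutral: counters and reduced unchanged
        have hred : List.filterMap pvRed [ch] = [] := by
          have h1 : ch ∉ pvVowB := hv
          have h2 : ch ∉ pvConsB := hc
          simp [pvRed, h1, h2]
        rw [hred, List.append_nil]
        refine ⟨by simp [pvStepA, hv, hc, ihv], by simp [pvStepA, hv, hc, ihc], ?_⟩
        simp only [List.foldl_cons, List.foldl_nil, pvStepA, if_neg hv, if_neg hc]
        constructor
        · intro h
          split_ifs at h with h1 h2 h2 <;> simp_all
        · intro hb
          have hlis := ihl.2 hb
          have h3 : st.1 ≠ 3 := by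
            rw [ihv]; have := pvBad_v_bound hb; omega
          have h5 : st.2.1 ≠ 5 := by
            rw [ihc]; have := pvBad_c_bound hb; omega
          simp [hlis, h3, h5]

-- ===== VERDICT (by name: the statement is the Claim_ definition above) =====
theorem classifyStrings_spec : Claim_equal_classifyStrings := by
  intro s _
  unfold Spec_classifyStrings classifyStrings classifyStrings_alt
  obtain ⟨_, _, hlis⟩ := pvInv s.toList
  by_cases hb : pvBad (s.toList.filterMap pvRed)
  · have h1 : ¬ (s.toList.foldl pvStepA (0,0,[])).2.2 = [] := fun h => (hlis.1 h) hb
    have h2 : (PySem.Chars.isIn ['v','v','v'] (s.toList.filterMap pvRed) ||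
               PySem.Chars.isIn ['c','c','c','c','c'] (s.toList.filterMap pvRed)) = true := by
      rcases hb with h | h
      · simp [PySem.Chars.isIn_iff_infix, h]
      · simp [PySem.Chars.isIn_iff_infix, h]
    simp [h1, h2]
  · have h1 : (s.toList.foldl pvStepA (0,0,[])).2.2 = [] := hlis.2 hb
    have h2 : (PySem.Chars.isIn ['v','v','v'] (s.toList.filterMap pvRed) ||
               PySem.Chars.isIn ['c','c','c','c','c'] (s.toList.filterMap pvRed)) = false := by
      unfold pvBad at hb
      rw [not_or] at hb
      simp [PySem.Chars.isIn_eq_false_iff, hb.1, hb.2]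
    simp [h1, h2]
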